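-- pv_equiv track=rewrite | github.com/liskos/zadanie25osipov | variant_20/5.py | f
-- ===== SOURCE A (Python) =====
-- def f(x):
--     n = x
--     s = 0
--     while x > 0:
--         s += x%2
--         x = x // 2
--     if s % 2 == 1:
--         return n * 4 + 2
--     else:
--         return n * 4
-- ===== SOURCE B (Python) =====
-- def f(x):
--     p = 0
--     v = x
--     while v > 0:
--         v &= v - 1  # clear lowest set bit (Kernighan)
--         p ^= 1      # flip parity
--     return x * 4 + 2 * p
-- ===== Notes on version B (the rewrite author's own statement) =====
-- stated objective: alternative
-- what changed: Replaced the divide-by-2 bit-summing loop (one iteration per bit, then s % 2) with Kernighan's v &= v-1 loop that clears one set bit per iteration while flipping a parity flag, and folded the final branch into the arithmetic x*4 + 2*p.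
import Mathlib
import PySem

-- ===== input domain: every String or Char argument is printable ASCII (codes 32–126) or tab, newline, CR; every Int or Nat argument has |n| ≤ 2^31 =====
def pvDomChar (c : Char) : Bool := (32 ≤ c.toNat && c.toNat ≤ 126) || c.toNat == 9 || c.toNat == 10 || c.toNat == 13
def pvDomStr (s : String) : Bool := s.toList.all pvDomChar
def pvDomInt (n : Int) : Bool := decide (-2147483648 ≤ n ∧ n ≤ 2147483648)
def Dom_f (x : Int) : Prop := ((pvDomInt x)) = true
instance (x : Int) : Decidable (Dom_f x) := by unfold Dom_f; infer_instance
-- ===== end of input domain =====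

-- B replaces A's divide-by-2 bit-summing loop with Kernighan's v &= v-1 parity loop; return value only, same on all inputs.


-- ===== PORT A =====
-- while x > 0: s += x%2; x = x//2
def fLoopA (x s : Int) : Int :=
  if 0 < x then fLoopA (PySem.Int.floordiv x 2) (s + PySem.Int.mod x 2) else s
termination_by x.toNat
decreasing_by
  rw [PySem.Int.floordiv_eq_ediv_of_pos (by omega : (0:Int) < 2)]
  omega

def f (x : Int) : Int :=
  let n := x
  let s := fLoopA x 0
  if PySem.Int.mod s 2 = 1 then n * 4 + 2 else n * 4

-- ===== PORT B =====
-- while v > 0: v &= v - 1; p ^= 1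
def fLoopB (v p : Int) : Int :=
  if 0 < v then fLoopB (PySem.Int.band v (v - 1)) (PySem.Int.bxor p 1) else p
termination_by v.toNat
decreasing_by
  rw [PySem.Int.band_of_nonneg (by omega) (by omega)]
  have h := Nat.and_le_right (n := v.toNat) (m := (v - 1).toNat)
  omega

def f_alt (x : Int) : Int :=
  x * 4 + 2 * fLoopB x 0

-- ===== PRECONDITION & SPEC =====
def Spec_f (x : Int) (out : Int) : Prop := out = f_alt x
instance (x : Int) (out : Int) : Decidable (Spec_f x out) := by unfold Spec_f; infer_instance

-- ===== CLAIM (what is proved, stated in full; the proofs are below) =====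
def Claim_equal_f : Prop := ∀ (x : Int), Dom_f x → Spec_f x (f x)

-- ===== LEMMAS AND PROOFS =====

-- popcount of a Nat, by repeated halving
def cnt : Nat → Nat
  | 0 => 0
  | n + 1 => (n + 1) % 2 + cnt ((n + 1) / 2)
decreasing_by omega

lemma cnt_rec (n : Nat) : cnt n = n % 2 + cnt (n / 2) := by
  cases n with
  | zero => simp [cnt]
  | succ m => rw [cnt]

lemma cnt_pos (n : Nat) (h : 0 < n) : 0 < cnt n := by
  induction n using Nat.strong_induction_on with
  | _ n ih =>
    rw [cnt_rec]
    rcases Nat.mod_two_eq_zero_or_one n with h2 | h2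
    · have : 0 < n / 2 := by omega
      have := ih (n / 2) (by omega) this
      omega
    · omega

-- Kernighan step: clearing the lowest set bit removes exactly one set bit
lemma cnt_and_pred (n : Nat) (h : 0 < n) : cnt (n &&& (n - 1)) + 1 = cnt n := by
  induction n using Nat.strong_induction_on with
  | _ n ih =>
    have hmod : (n &&& (n - 1)) % 2 = n % 2 &&& (n - 1) % 2 := by
      have := Nat.and_mod_two_pow (a := n) (b := n - 1) (n := 1)
      simpa using this
    have hdiv : (n &&& (n - 1)) / 2 = n / 2 &&& (n - 1) / 2 := Nat.and_div_two
    rcases Nat.mod_two_eq_zero_or_one n with h2 | h2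
    · -- n even, n = 2m with m > 0
      have hm : 0 < n / 2 := by omega
      have h1 : (n - 1) % 2 = 1 := by omega
      have h1d : (n - 1) / 2 = n / 2 - 1 := by omega
      rw [cnt_rec (n &&& (n - 1)), hmod, hdiv, h2, h1, h1d]
      have := ih (n / 2) (by omega) hm
      rw [cnt_rec n, h2]
      simpa using this
    · -- n odd: n &&& (n-1) has even bit 0 and high part n/2 &&& n/2 = n/2
      have h1 : (n - 1) % 2 = 0 := by omega
      have h1d : (n - 1) / 2 = n / 2 := by omega
      rw [cnt_rec (n &&& (n - 1)), hmod, hdiv, h2, h1, h1d, Nat.and_self]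
      rw [cnt_rec n, h2]
      have h10 : (1 &&& 0) = 0 := rfl
      omega

lemma loopA_eq (x s : Int) : fLoopA x s = s + (cnt x.toNat : Int) := by
  induction x, s using fLoopA.induct with
  | case1 x s hx ih =>
    rw [fLoopA, if_pos hx, ih]
    rw [PySem.Int.floordiv_eq_ediv_of_pos (by omega : (0:Int) < 2),
        PySem.Int.mod_eq_emod_of_pos (by omega : (0:Int) < 2)]
    have h1 : (x / 2).toNat = x.toNat / 2 := by omega
    have h2 : x % 2 = ((x.toNat % 2 : Nat) : Int) := by omega
    rw [h1, h2, cnt_rec x.toNat]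
    push_cast
    ring
  | case2 x s hx =>
    rw [fLoopA, if_neg hx]
    have : x.toNat = 0 := by omega
    simp [this, cnt]

lemma loopB_eq (v p : Int) (hv : 0 ≤ v) (hp : p = 0 ∨ p = 1) :
    fLoopB v p = (((p.toNat + cnt v.toNat) % 2 : Nat) : Int) := by
  induction v, p using fLoopB.induct with
  | case1 v p hx ih =>
    have hband : PySem.Int.band v (v - 1) = ((v.toNat &&& (v - 1).toNat : Nat) : Int) :=
      PySem.Int.band_of_nonneg (by omega) (by omega)
    have hxor : PySem.Int.bxor p 1 = 1 - p := by
      rcases hp with h | h <;> subst h <;> decide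
    have hsub : (v - 1).toNat = v.toNat - 1 := by omega
    have hih := ih (by rw [hband]; exact Int.natCast_nonneg _)
      (by rcases hp with h | h <;> subst h <;> [right; left] <;> decide)
    rw [fLoopB, if_pos hx, hih, hband, hxor, hsub]
    have hc := cnt_and_pred v.toNat (by omega)
    have hcpos := cnt_pos v.toNat (by omega)
    have htn : ((v.toNat &&& (v.toNat - 1) : Nat) : Int).toNat = v.toNat &&& (v.toNat - 1) := by
      omega
    rw [htn]
    have hxt : (1 - p).toNat = 1 - p.toNat := by rcases hp with h | h <;> subst h <;> decide
    rw [hxt]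
    congr 1
    have hp01 : p.toNat = 0 ∨ p.toNat = 1 := by rcases hp with h | h <;> subst h <;> simp
    omega
  | case2 v p hx =>
    rw [fLoopB, if_neg hx]
    have : v.toNat = 0 := by omega
    rw [this]
    rcases hp with h | h <;> subst h <;> simp [cnt]

lemma f_eq_f_alt (x : Int) : f x = f_alt x := by
  by_cases hx : 0 ≤ x
  · have hA : fLoopA x 0 = (cnt x.toNat : Int) := by rw [loopA_eq]; ring
    have hB : fLoopB x 0 = (((0 + cnt x.toNat) % 2 : Nat) : Int) := loopB_eq x 0 hx (Or.inl rfl)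
    rw [f, f_alt, hA, hB]
    have hm : PySem.Int.mod ((cnt x.toNat : Nat) : Int) 2 = (((cnt x.toNat) % 2 : Nat) : Int) := by
      exact_mod_cast PySem.Int.mod_natCast (cnt x.toNat) 2
    rw [hm]
    rcases Nat.mod_two_eq_zero_or_one (cnt x.toNat) with h | h
    · simp [h]
    · simp [h]
  · have hA : fLoopA x 0 = 0 := by rw [fLoopA, if_neg (by omega)]
    have hB : fLoopB x 0 = 0 := by rw [fLoopB, if_neg (by omega)]
    rw [f, f_alt, hA, hB]
    norm_num [PySem.Int.mod]

-- ===== VERDICT (by name: the statement is the Claim_ definition above) =====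
theorem f_spec : Claim_equal_f := by
  intro x _
  unfold Spec_f
  exact f_eq_f_alt x
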